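-- pv_equiv track=rewrite | github.com/AlexLagin/Bakalarka | bp_code.py | check_left_recursion
-- ===== SOURCE A (Python) =====
-- def check_left_recursion(grammar):
--     direct = set()
--     indirect = set()
--
--     for A, productions in grammar.items():
--         for prod in productions:
--             if not prod:
--                 continue
--             if prod.startswith(A):
--                 direct.add(A)
--             elif prod[0].isupper() and not prod.startswith(A):
--                 B = prod[0]
--                 if leads_leftmost_to_A(A, B, grammar):
--                     indirect.add(A)
--
--     return direct, indirect
--
-- def leads_leftmost_to_A(current, target, grammar, visited=None):
--     if visited is None:
--         visited = set()
--
--     if current in visited: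
--         return False
--     visited.add(current)
--
--     for p in grammar.get(current, []):
--         if not p:
--             continue
--         first_sym = p[0]
--         if first_sym == target:
--             return True
--         if first_sym.isupper() and first_sym != target:
--             if leads_leftmost_to_A(first_sym, target, grammar, visited.copy()):
--                 return True
--
--     return False
-- ===== SOURCE B (Python) =====
-- def check_left_recursion(grammar):
--     # One pass over the grammar, no recursion: A's leads_leftmost_to_A(A, B, grammar)
--     # is called with B = prod[0] for a production prod of A itself, so it always
--     # finds prod (first_sym == target) and returns True; the reachability search is dead.
--     direct = {A for A, prods in grammar.items()
--               if any(p and p.startswith(A) for p in prods)}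
--     indirect = {A for A, prods in grammar.items()
--                 if any(p and p[0].isupper() and not p.startswith(A) for p in prods)}
--     return direct, indirect
-- ===== Notes on version B (the rewrite author's own statement) =====
-- stated objective: simpler
-- what changed: B removes A's recursive leftmost-reachability helper entirely (A only ever calls it with the first symbol of one of the caller's own productions as target, so it provably always returns True) and computes both sets in one pass of two comprehensions.
import Mathlib
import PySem

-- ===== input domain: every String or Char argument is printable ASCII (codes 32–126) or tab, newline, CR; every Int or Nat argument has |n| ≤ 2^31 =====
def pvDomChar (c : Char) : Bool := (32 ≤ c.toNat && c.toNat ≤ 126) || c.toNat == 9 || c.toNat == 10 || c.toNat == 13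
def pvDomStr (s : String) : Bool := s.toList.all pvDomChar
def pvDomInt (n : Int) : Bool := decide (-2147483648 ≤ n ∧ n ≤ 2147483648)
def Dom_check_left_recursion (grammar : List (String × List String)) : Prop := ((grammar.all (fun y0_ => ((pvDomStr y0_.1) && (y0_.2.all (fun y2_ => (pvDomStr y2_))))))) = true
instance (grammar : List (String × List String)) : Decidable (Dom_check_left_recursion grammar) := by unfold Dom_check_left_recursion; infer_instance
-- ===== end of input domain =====

-- B drops A's recursive leftmost-reachability search (A only ever calls it with a target that is
-- the first symbol of one of the caller's own productions, so it always returns True) and does a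
-- single pass of two filters instead.

-- ===== PORT A =====
-- literal port of leads_leftmost_to_A; `fuel` only makes the recursion structural (the Python
-- recursion terminates because `visited` grows; A's caller passes grammar size + 2, which is
-- never exhausted, since recursive calls only continue from grammar keys not yet in visited).
def leads_leftmost_to_A (grammar : PySem.Dict String (List String)) (target : String) :
    Nat → String → PySem.Set String → Bool
  | 0, _, _ => false
  | fuel+1, current, visited =>
    if PySem.Set.contains visited current then false
    else
      let visited' := PySem.Set.add visited current        -- visited.add(current)
      (grammar.getD current []).any (fun p =>              -- for p in grammar.get(current, []):
        match p.toList with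
        | [] => false                                      -- if not p: continue
        | c :: _ =>                                        -- first_sym = p[0]
          if String.ofList [c] == target then true
          else if PySem.Chars.isupper c && String.ofList [c] != target then
            leads_leftmost_to_A grammar target fuel (String.ofList [c]) visited'  -- visited.copy()
          else false)

def check_left_recursion (grammar : List (String × List String)) : List String × List String :=
  let g := PySem.Dict.ofList grammar
  g.items.foldl (fun (st : PySem.Set String × PySem.Set String) Aps =>
    Aps.2.foldl (fun st prod =>
      match prod.toList with
      | [] => st                                           -- if not prod: continue
      | c :: _ =>
        if PySem.Str.startswith prod Aps.1 then (PySem.Set.add st.1 Aps.1, st.2)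
        else if PySem.Chars.isupper c && !PySem.Str.startswith prod Aps.1 then
          if leads_leftmost_to_A g (String.ofList [c]) (g.size + 2) Aps.1 PySem.Set.empty then
            (st.1, PySem.Set.add st.2 Aps.1)
          else st
        else st) st) (PySem.Set.empty, PySem.Set.empty)

-- ===== PORT B =====
def check_left_recursion_alt (grammar : List (String × List String)) : List String × List String :=
  let g := PySem.Dict.ofList grammar
  let direct := PySem.Set.ofList ((g.items.filter (fun Aps =>
      Aps.2.any (fun p => !p.toList.isEmpty && PySem.Str.startswith p Aps.1))).map (fun Aps => Aps.1))
  let indirect := PySem.Set.ofList ((g.items.filter (fun Aps =>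
      Aps.2.any (fun p =>
        match p.toList with
        | [] => false
        | c :: _ => PySem.Chars.isupper c && !PySem.Str.startswith p Aps.1))).map (fun Aps => Aps.1))
  (direct, indirect)

-- ===== PRECONDITION & SPEC =====
def Spec_check_left_recursion (grammar : List (String × List String)) (out : List String × List String) : Prop := out = check_left_recursion_alt grammar
instance (grammar : List (String × List String)) (out : List String × List String) : Decidable (Spec_check_left_recursion grammar out) := by unfold Spec_check_left_recursion; infer_instance

-- ===== CLAIM (what is proved, stated in full; the proofs are below) =====
def Claim_equal_check_left_recursion : Prop := ∀ (grammar : List (String × List String)), Dom_check_left_recursion grammar → Spec_check_left_recursion grammar (check_left_recursion grammar)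

-- ===== LEMMAS AND PROOFS =====

-- A's helper always succeeds on the calls A makes: the target is the first symbol of a
-- production of `current` itself, so the first loop pass over that production returns True.
theorem pv_leads_true (g : PySem.Dict String (List String)) (A prod : String) (c : Char)
    (cs : List Char) (h : prod ∈ g.getD A []) (hc : prod.toList = c :: cs) (fuel : Nat) :
    leads_leftmost_to_A g (String.ofList [c]) (fuel + 1) A PySem.Set.empty = true := by
  unfold leads_leftmost_to_A
  have hv : PySem.Set.contains PySem.Set.empty A = false := by
    simp [PySem.Set.contains_eq_listContains, PySem.Set.empty]
  rw [hv]
  simp only [Bool.false_eq_true, if_false]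
  refine List.any_eq_true.2 ⟨prod, h, ?_⟩
  simp [hc]

-- closed form of A's inner loop over one nonterminal's productions (with the helper's
-- calls already replaced by True)
theorem pv_inner_fold (A : String) (ps : List String) (s1 s2 : PySem.Set String) :
    ps.foldl (fun st prod =>
      match prod.toList with
      | [] => st
      | c :: _ =>
        if PySem.Str.startswith prod A then (PySem.Set.add st.1 A, st.2)
        else if PySem.Chars.isupper c && !PySem.Str.startswith prod A then
          (st.1, PySem.Set.add st.2 A)
        else st) (s1, s2)
    = ((if ps.any (fun p => !p.toList.isEmpty && PySem.Str.startswith p A) then PySem.Set.add s1 A else s1),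
       (if ps.any (fun p =>
            match p.toList with
            | [] => false
            | c :: _ => PySem.Chars.isupper c && !PySem.Str.startswith p A) then PySem.Set.add s2 A else s2)) := by
  have add2 : ∀ (s : PySem.Set String), PySem.Set.add (PySem.Set.add s A) A = PySem.Set.add s A := by
    intro s; rw [PySem.Set.add_of_mem]; simp [PySem.Set.mem_add]
  induction ps generalizing s1 s2 with
  | nil => rfl
  | cons p l ih =>
    simp only [List.foldl_cons, List.any_cons]
    obtain hp | ⟨c, cs, hp⟩ : p.toList = [] ∨ ∃ c cs, p.toList = c :: cs := by
      cases p.toList with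
      | nil => exact Or.inl rfl
      | cons c cs => exact Or.inr ⟨c, cs, rfl⟩
    · simp only [hp, List.isEmpty_nil, Bool.not_true, Bool.false_and, Bool.false_or]
      exact ih s1 s2
    · simp only [hp, List.isEmpty_cons, Bool.not_false, Bool.true_and]
      by_cases hs : PySem.Str.startswith p A
      · simp only [hs, if_true, Bool.not_true, Bool.and_false, Bool.false_or, Bool.true_or]
        rw [ih]
        by_cases h1 : l.any (fun p => !p.toList.isEmpty && PySem.Str.startswith p A) <;>
          simp [h1, add2]
      · simp only [hs, if_false, Bool.not_false, Bool.and_true, Bool.false_or]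
        by_cases hu : PySem.Chars.isupper c
        · simp only [hu, if_true]
          rw [ih]
          by_cases h2 : l.any (fun p =>
              match p.toList with
              | [] => false
              | c :: _ => PySem.Chars.isupper c && !PySem.Str.startswith p A) <;>
            simp [h2, add2]
        · simp only [hu, if_false]
          rw [ih]
          simp [hu]

-- a fold updating the two set components independently splits into two filtered add-folds
theorem pv_pair_fold (cD cI : String × List String → Bool)
    (items : List (String × List String)) (s1 s2 : PySem.Set String) :
    items.foldl (fun (st : PySem.Set String × PySem.Set String) Aps =>
      ((if cD Aps then PySem.Set.add st.1 Aps.1 else st.1),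
       (if cI Aps then PySem.Set.add st.2 Aps.1 else st.2))) (s1, s2)
    = (((items.filter cD).map (fun Aps => Aps.1)).foldl PySem.Set.add s1,
       ((items.filter cI).map (fun Aps => Aps.1)).foldl PySem.Set.add s2) := by
  induction items generalizing s1 s2 with
  | nil => rfl
  | cons a l ih =>
    simp only [List.foldl_cons, List.filter_cons]
    by_cases hd : cD a <;> by_cases hi : cI a <;> simp [hd, hi, ih]

-- ===== VERDICT (by name: the statement is the Claim_ definition above) =====
theorem check_left_recursion_spec : Claim_equal_check_left_recursion := by
  intro grammar _
  unfold Spec_check_left_recursion check_left_recursion check_left_recursion_alt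
  have hnd := PySem.Dict.nodup_keys_ofList grammar
  rw [PySem.List.foldl_congr_mem _ _
    (fun (st : PySem.Set String × PySem.Set String) Aps =>
      ((if Aps.2.any (fun p => !p.toList.isEmpty && PySem.Str.startswith p Aps.1) then PySem.Set.add st.1 Aps.1 else st.1),
       (if Aps.2.any (fun p =>
            match p.toList with
            | [] => false
            | c :: _ => PySem.Chars.isupper c && !PySem.Str.startswith p Aps.1) then PySem.Set.add st.2 Aps.1 else st.2))) _
    ?_, pv_pair_fold]
  · rfl
  intro st Aps hmem
  obtain ⟨A, ps⟩ := Aps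
  have hget : (PySem.Dict.ofList grammar).getD A [] = ps :=
    PySem.Dict.getD_of_mem_items _ hmem hnd []
  rw [PySem.List.foldl_congr_mem _ _
    (fun (st : PySem.Set String × PySem.Set String) prod =>
      match prod.toList with
      | [] => st
      | c :: _ =>
        if PySem.Str.startswith prod A then (PySem.Set.add st.1 A, st.2)
        else if PySem.Chars.isupper c && !PySem.Str.startswith prod A then
          (st.1, PySem.Set.add st.2 A)
        else st) _ ?_, pv_inner_fold]
  intro st2 prod hp
  obtain h0 | ⟨c, cs, hc⟩ : prod.toList = [] ∨ ∃ c cs, prod.toList = c :: cs := by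
    cases prod.toList with
    | nil => exact Or.inl rfl
    | cons c cs => exact Or.inr ⟨c, cs, rfl⟩
  · simp only [h0]
  · have hlead : leads_leftmost_to_A (PySem.Dict.ofList grammar) (String.ofList [c])
        ((PySem.Dict.ofList grammar).size + 2) A PySem.Set.empty = true := by
      have h2 : (PySem.Dict.ofList grammar).size + 2 = ((PySem.Dict.ofList grammar).size + 1) + 1 := rfl
      rw [h2]
      exact pv_leads_true _ A prod c cs (by rw [hget]; exact hp) hc _
    simp only [hc, hlead, if_true]
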